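-- pv_equiv track=rewrite | github.com/aanorlondo/My_Codingames | urinals-with-memoization.py | count
-- ===== SOURCE A (Python) =====
-- segments = {} #for @memoization purposes
--
-- def count(begin, end) : #yes, it will be recursive :)
--     distance = end - begin
--     if distance <= 3 :
--         return 0
--     mid = (begin+end)//2
--     if distance not in segments : #distances are classes of equivalence (5-2 = 3-0 = 4-1, etc.)
--         segments[distance] = count(begin,mid) + count(mid,end) + 1 #+1 is for the middle creating 2 new segments
--     return segments[distance]
-- ===== SOURCE B (Python) =====
-- def count(begin, end):
--     # Level-by-level counting: each level of the halving tree contains segments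
--     # of only two adjacent sizes q and q+1; track their multiplicities (a, b)
--     # instead of recursing, so the whole computation is O(log(end-begin)).
--     q, a, b = end - begin, 1, 0
--     total = 0
--     while q > 3:
--         total += a + b
--         if q % 2 == 0:
--             q, a, b = q // 2, 2 * a + b, b
--         else:
--             q, a, b = q // 2, a, a + 2 * b
--     return total + (b if q == 3 else 0)
-- ===== Notes on version B (the rewrite author's own statement) =====
-- stated objective: alternative
-- what changed: Replaces the memoized halving recursion over (begin,end) pairs by a bottom-free iterative loop on the distance alone: each level of the implicit subdivision tree contains segments of only two adjacent sizes q and q+1, so B tracks just (q, a, b) multiplicities and a running total in O(log(end-begin)) arithmetic steps, with no recursion and no dict.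
import Mathlib
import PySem

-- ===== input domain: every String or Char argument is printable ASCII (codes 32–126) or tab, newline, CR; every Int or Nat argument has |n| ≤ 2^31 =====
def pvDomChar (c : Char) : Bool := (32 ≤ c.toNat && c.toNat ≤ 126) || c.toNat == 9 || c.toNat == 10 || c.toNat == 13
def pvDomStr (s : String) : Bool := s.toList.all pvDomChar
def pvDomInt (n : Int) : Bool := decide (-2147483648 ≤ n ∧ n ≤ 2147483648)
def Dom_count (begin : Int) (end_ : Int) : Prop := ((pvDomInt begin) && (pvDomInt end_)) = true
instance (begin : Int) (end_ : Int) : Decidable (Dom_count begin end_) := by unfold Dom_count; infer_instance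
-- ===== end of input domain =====

-- B replaces the memoized recursion by an O(log d) level-by-level loop over
-- segment-size multiplicities (objective: alternative decomposition).
-- A's global memo dict is threaded as explicit state (fresh per top-level call);
-- the RETURN value is identical, the persistent global mutation is not modelled.

-- ===== PORT A =====
-- Python A's global `segments` dict becomes a state parameter; `segments[distance]`
-- after the branch is always present, so `getD distance 0` reads exactly that value.
def countAux (begin end_ : Int) (segments : PySem.Dict Int Int) : Int × PySem.Dict Int Int :=
  let distance := end_ - begin
  if _h : distance ≤ 3 then (0, segments)
  else
    let mid := PySem.Int.floordiv (begin + end_) 2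
    if (segments.get? distance).isNone then
      let r1 := countAux begin mid segments
      let r2 := countAux mid end_ r1.2
      let segments' := r2.2.insert distance (r1.1 + r2.1 + 1)
      (segments'.getD distance 0, segments')
    else (segments.getD distance 0, segments)
termination_by (end_ - begin).toNat
decreasing_by
  · simp only [PySem.Int.floordiv_eq_ediv_of_pos (by norm_num : (0:Int) < 2)]
    omega
  · simp only [PySem.Int.floordiv_eq_ediv_of_pos (by norm_num : (0:Int) < 2)]
    omega

def count (begin : Int) (end_ : Int) : Int :=
  (countAux begin end_ PySem.Dict.empty).1

-- ===== PORT B =====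
def countLoop (q a b total : Int) : Int :=
  if q > 3 then
    if PySem.Int.mod q 2 == 0 then
      countLoop (PySem.Int.floordiv q 2) (2 * a + b) b (total + a + b)
    else
      countLoop (PySem.Int.floordiv q 2) a (a + 2 * b) (total + a + b)
  else
    total + (if q == 3 then b else 0)
termination_by q.toNat
decreasing_by
  · simp only [PySem.Int.floordiv_eq_ediv_of_pos (by norm_num : (0:Int) < 2)]
    omega
  · simp only [PySem.Int.floordiv_eq_ediv_of_pos (by norm_num : (0:Int) < 2)]
    omega

def count_alt (begin : Int) (end_ : Int) : Int :=
  countLoop (end_ - begin) 1 0 0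

-- ===== PRECONDITION & SPEC =====
def Spec_count (begin : Int) (end_ : Int) (out : Int) : Prop := out = count_alt begin end_
instance (begin : Int) (end_ : Int) (out : Int) : Decidable (Spec_count begin end_ out) := by unfold Spec_count; infer_instance

-- ===== CLAIM (what is proved, stated in full; the proofs are below) =====
def Claim_equal_count : Prop := ∀ (begin : Int) (end_ : Int), Dom_count begin end_ → Spec_count begin end_ (count begin end_)

-- ===== LEMMAS AND PROOFS =====

-- Reference recurrence on the distance only: f(d) = f(d//2) + f(d-d//2) + 1.
def fRef (d : Int) : Int :=
  if d ≤ 3 then 0 else fRef (d / 2) + fRef (d - d / 2) + 1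
termination_by d.toNat
decreasing_by
  · omega
  · omega

theorem fRef_of_le {d : Int} (h : d ≤ 3) : fRef d = 0 := by
  rw [fRef]; simp [h]

theorem fRef_of_gt {d : Int} (h : 3 < d) : fRef d = fRef (d / 2) + fRef (d - d / 2) + 1 := by
  rw [fRef]; simp [show ¬ d ≤ 3 by omega]

def GoodDict (s : PySem.Dict Int Int) : Prop :=
  ∀ k v, s.get? k = some v → v = fRef k

theorem countAux_spec (n : Nat) :
    ∀ (b e : Int) (s : PySem.Dict Int Int), (e - b).toNat ≤ n → GoodDict s →
      (countAux b e s).1 = fRef (e - b) ∧ GoodDict (countAux b e s).2 := by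
  induction n with
  | zero =>
    intro b e s hn hg
    rw [countAux]
    have hle : e - b ≤ 3 := by omega
    simp only [hle, dite_true]
    exact ⟨(fRef_of_le hle).symm, hg⟩
  | succ n ih =>
    intro b e s hn hg
    rw [countAux]
    by_cases hle : e - b ≤ 3
    · simp only [hle, dite_true]
      exact ⟨(fRef_of_le hle).symm, hg⟩
    · simp only [hle, dite_false]
      set d := e - b with hd
      set mid := PySem.Int.floordiv (b + e) 2 with hmid
      have hmid' : mid = (b + e) / 2 := by
        rw [hmid, PySem.Int.floordiv_eq_ediv_of_pos (by norm_num : (0:Int) < 2)]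
      have h1 : mid - b = d / 2 := by omega
      have h2 : e - mid = d - d / 2 := by omega
      have hlt1 : (mid - b).toNat ≤ n := by omega
      have hlt2 : (e - mid).toNat ≤ n := by omega
      by_cases hnone : (s.get? d).isNone
      · simp only [hnone, if_pos]
        obtain ⟨ha1, hg1⟩ := ih b mid s hlt1 hg
        obtain ⟨ha2, hg2⟩ := ih mid e (countAux b mid s).2 hlt2 hg1
        set v := (countAux b mid s).1 + (countAux mid e (countAux b mid s).2).1 + 1 with hv
        have hval : v = fRef d := by
          rw [hv, ha1, ha2, h1, h2,
            show fRef d = fRef (d / 2) + fRef (d - d / 2) + 1 from fRef_of_gt (by omega)]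
        constructor
        · rw [PySem.Dict.getD_insert_self]
          exact hval
        · intro k w hk
          by_cases hkd : k = d
          · subst hkd
            rw [PySem.Dict.get?_insert_self] at hk
            cases hk
            exact hval
          · rw [PySem.Dict.get?_insert_of_ne _ _ hkd] at hk
            exact hg2 k w hk
      · simp only [hnone, Bool.false_eq_true, if_false]
        obtain ⟨w, hw⟩ : ∃ w, s.get? d = some w := by
          cases h : s.get? d with
          | none => rw [h] at hnone; simp at hnone
          | some w => exact ⟨w, rfl⟩
        refine ⟨?_, hg⟩
        rw [PySem.Dict.getD_of_get?_eq_some _ _ hw]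
        exact hg d w hw

theorem countLoop_spec : ∀ (q a b total : Int),
    countLoop q a b total = total + a * fRef q + b * fRef (q + 1) := by
  intro q a b total
  induction q, a, b, total using countLoop.induct with
  | case1 q a b total hq hev ih =>
    rw [countLoop]
    simp only [hq, if_pos, hev, if_pos]
    rw [ih]
    have h2 : PySem.Int.floordiv q 2 = q / 2 :=
      PySem.Int.floordiv_eq_ediv_of_pos (by norm_num)
    have hm : PySem.Int.mod q 2 = q % 2 :=
      PySem.Int.mod_eq_emod_of_pos (by norm_num)
    have hev' : q % 2 = 0 := by
      simpa [hm] using hev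
    rw [h2]
    have e1 : fRef q = 2 * fRef (q / 2) + 1 := by
      rw [fRef_of_gt hq]
      have : q - q / 2 = q / 2 := by omega
      rw [this]; ring
    have e2 : fRef (q + 1) = fRef (q / 2) + fRef (q / 2 + 1) + 1 := by
      rw [fRef_of_gt (by omega)]
      have ha : (q + 1) / 2 = q / 2 := by omega
      rw [ha]
      have hb : q + 1 - q / 2 = q / 2 + 1 := by omega
      rw [hb]
    rw [e1, e2]; ring
  | case2 q a b total hq hev ih =>
    rw [countLoop]
    simp only [hq, if_pos, hev, Bool.false_eq_true, if_false]
    rw [ih]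
    have h2 : PySem.Int.floordiv q 2 = q / 2 :=
      PySem.Int.floordiv_eq_ediv_of_pos (by norm_num)
    have hm : PySem.Int.mod q 2 = q % 2 :=
      PySem.Int.mod_eq_emod_of_pos (by norm_num)
    have hodd : q % 2 = 1 := by
      have : ¬ PySem.Int.mod q 2 = 0 := by simpa using hev
      rw [hm] at this; omega
    rw [h2]
    have e1 : fRef q = fRef (q / 2) + fRef (q / 2 + 1) + 1 := by
      rw [fRef_of_gt hq]
      have : q - q / 2 = q / 2 + 1 := by omega
      rw [this]
    have e2 : fRef (q + 1) = 2 * fRef (q / 2 + 1) + 1 := by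
      rw [fRef_of_gt (by omega)]
      have ha : (q + 1) / 2 = q / 2 + 1 := by omega
      rw [ha]
      have hb : q + 1 - (q / 2 + 1) = q / 2 + 1 := by omega
      rw [hb]; ring
    rw [e1, e2]; ring
  | case3 q a b total hq =>
    rw [countLoop]
    simp only [hq]
    by_cases h3 : q = 3
    · subst h3
      have f3 : fRef 3 = 0 := fRef_of_le (by norm_num)
      have f4 : fRef 4 = 1 := by
        rw [fRef_of_gt (by norm_num)]
        norm_num [fRef_of_le]
      simp [f3, f4]
    · have hq3 : q ≤ 2 := by omega
      have f1 : fRef q = 0 := fRef_of_le (by omega)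
      have f2 : fRef (q + 1) = 0 := fRef_of_le (by omega)
      simp [h3, f1, f2]

-- ===== VERDICT (by name: the statement is the Claim_ definition above) =====
theorem count_spec : Claim_equal_count := by
  intro b e _
  unfold Spec_count count count_alt
  have hempty : GoodDict PySem.Dict.empty := by
    intro k v hk
    rw [PySem.Dict.get?_empty] at hk
    cases hk
  have hA := (countAux_spec (e - b).toNat b e PySem.Dict.empty le_rfl hempty).1
  rw [hA, countLoop_spec]
  ring
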